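-- pv_equiv track=rewrite | github.com/UMR-CNRM/vortex | bin/uget.py | _complete_diff_export
-- ===== SOURCE A (Python) =====
-- def _complete_diff_export(text, line, begidx, endidx):
--     """Auto-completion for the *diff* or *export* command."""
--     sline = line.split()
--     # First keyword
--     if len(sline) == 1 or (len(sline) == 2 and sline[1] not in ('env', )):
--         completions = ('env', )
--     # Third keyword
--     elif len(sline) == 3 or (len(sline) == 4 and sline[3] not in ('wrt', )):
--         completions = ('wrt', )
--     # Forth keyword
--     elif len(sline) == 4 or (len(sline) == 5 and sline[4] not in ('env', 'genv', 'parent')):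
--         completions = ('env', 'genv', 'parent')
--     # Forth keyword
--     else:
--         completions = ()
--     return [f for f in completions if not text or f.startswith(text)]
-- ===== SOURCE B (Python) =====
-- # Recursive grammar walk: co-traverse the word list and a slot grammar
-- # (None = free-text slot), proposing the slot reached by the last word.
-- _SLOTS = [None, ('env',), None, ('wrt',), ('env', 'genv', 'parent')]
--
--
-- def _complete_diff_export(text, line, begidx, endidx):
--     """Auto-completion for the *diff* or *export* command."""
--     def walk(tokens, slots):
--         if not slots:
--             return ()
--         if not tokens:
--             return slots[0] or ()
--         if len(tokens) == 1:
--             t = tokens[0]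
--             if slots[0] is None or t in slots[0]:
--                 # token fills its slot: propose what the next slot expects
--                 return (slots[1] or ()) if len(slots) > 1 else ()
--             return slots[0]
--         return walk(tokens[1:], slots[1:])
--     completions = walk(line.split(), _SLOTS)
--     return [f for f in completions if not text or f.startswith(text)]
-- ===== Notes on version B (the rewrite author's own statement) =====
-- stated objective: alternative
-- what changed: Replaces A's flat if/elif chain over len(sline) by a recursive co-traversal of the token list and a slot-grammar list (None = free slot), which proposes the slot the last token reaches or, if it already fills it, the next slot.
import Mathlib
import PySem

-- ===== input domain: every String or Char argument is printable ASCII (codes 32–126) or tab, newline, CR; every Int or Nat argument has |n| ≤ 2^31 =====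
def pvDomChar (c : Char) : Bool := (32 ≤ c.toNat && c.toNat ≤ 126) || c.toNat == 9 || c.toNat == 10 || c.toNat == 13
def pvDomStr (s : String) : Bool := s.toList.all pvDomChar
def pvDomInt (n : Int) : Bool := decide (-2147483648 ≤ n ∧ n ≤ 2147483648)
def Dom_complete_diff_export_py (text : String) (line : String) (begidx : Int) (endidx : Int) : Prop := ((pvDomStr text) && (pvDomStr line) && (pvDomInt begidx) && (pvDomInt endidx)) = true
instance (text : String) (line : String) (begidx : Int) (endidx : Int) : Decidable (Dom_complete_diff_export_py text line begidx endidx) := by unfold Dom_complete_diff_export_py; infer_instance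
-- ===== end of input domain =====

-- B replaces A's if/elif length-case chain by a recursive co-traversal of the word
-- list and a slot grammar (objective: alternative; same behaviour, same cost).

-- ===== PORT A =====
-- Literal transliteration of A's if/elif chain.  'sline[i] not in (kw, …)' is ported
-- as a test on PySem.List.pyGet? sline i; each such access is guarded by the length
-- test just before it, so the index is always in range and getD "" is exact.
def complete_diff_export_py (text : String) (line : String) (begidx : Int) (endidx : Int) : List String :=
  let sline := PySem.Str.split₀ line
  let completions : List String :=
    if sline.length = 1 ∨ (sline.length = 2 ∧ (PySem.List.pyGet? sline 1).getD "" ∉ (["env"] : List String)) then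
      ["env"]
    else if sline.length = 3 ∨ (sline.length = 4 ∧ (PySem.List.pyGet? sline 3).getD "" ∉ (["wrt"] : List String)) then
      ["wrt"]
    else if sline.length = 4 ∨ (sline.length = 5 ∧ (PySem.List.pyGet? sline 4).getD "" ∉ (["env", "genv", "parent"] : List String)) then
      ["env", "genv", "parent"]
    else
      []
  completions.filter (fun f => decide (text = "") || PySem.Str.startswith f text)

-- ===== PORT B =====
-- The slot grammar of Source B: one entry per token position, none = free-text slot.
def pvSlots : List (Option (List String)) :=
  [none, some ["env"], none, some ["wrt"], some ["env", "genv", "parent"]]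

-- Transliteration of Source B's 'walk': recurse down the token list and the slot list in
-- step; at the last token, a token filling its slot proposes the next slot's keywords
-- ('slots[1] or ()' / '()' past the end), an invalid one re-proposes its own slot.
def pvWalk : List String → List (Option (List String)) → List String
  | _, [] => []
  | [], s :: _ => s.getD []
  | [t], s :: rest =>
      let next : List String := match rest with | [] => [] | s2 :: _ => s2.getD []
      match s with
      | none => next
      | some kws => if t ∈ kws then next else kws
  | _ :: t :: ts, _ :: ss => pvWalk (t :: ts) ss

def complete_diff_export_py_alt (text : String) (line : String) (begidx : Int) (endidx : Int) : List String :=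
  let completions := pvWalk (PySem.Str.split₀ line) pvSlots
  completions.filter (fun f => decide (text = "") || PySem.Str.startswith f text)

-- ===== PRECONDITION & SPEC =====
def Spec_complete_diff_export_py (text : String) (line : String) (begidx : Int) (endidx : Int) (out : List String) : Prop := out = complete_diff_export_py_alt text line begidx endidx
instance (text : String) (line : String) (begidx : Int) (endidx : Int) (out : List String) : Decidable (Spec_complete_diff_export_py text line begidx endidx out) := by unfold Spec_complete_diff_export_py; infer_instance

-- ===== CLAIM (what is proved, stated in full; the proofs are below) =====
def Claim_equal_complete_diff_export_py : Prop := ∀ (text : String) (line : String) (begidx : Int) (endidx : Int), Dom_complete_diff_export_py text line begidx endidx → Spec_complete_diff_export_py text line begidx endidx (complete_diff_export_py text line begidx endidx)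

-- ===== LEMMAS AND PROOFS =====

-- Key lemma: for every word list, A's branch chain and B's grammar walk select the
-- same completion tuple.
theorem pv_comps_eq (l : List String) :
    (if l.length = 1 ∨ (l.length = 2 ∧ (PySem.List.pyGet? l 1).getD "" ∉ (["env"] : List String)) then
      (["env"] : List String)
    else if l.length = 3 ∨ (l.length = 4 ∧ (PySem.List.pyGet? l 3).getD "" ∉ (["wrt"] : List String)) then
      ["wrt"]
    else if l.length = 4 ∨ (l.length = 5 ∧ (PySem.List.pyGet? l 4).getD "" ∉ (["env", "genv", "parent"] : List String)) then
      ["env", "genv", "parent"]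
    else
      []) = pvWalk l pvSlots := by
  match l with
  | [] => decide
  | [a] => simp [pvWalk, pvSlots, PySem.List.pyGet?, PySem.List.pyIdx?]
  | [a, b] =>
      by_cases hb : b = "env" <;>
        simp [pvWalk, pvSlots, PySem.List.pyGet?, PySem.List.pyIdx?, hb]
  | [a, b, c] => simp [pvWalk, pvSlots, PySem.List.pyGet?, PySem.List.pyIdx?]
  | [a, b, c, d] =>
      by_cases hd : d = "wrt" <;>
        simp [pvWalk, pvSlots, PySem.List.pyGet?, PySem.List.pyIdx?, hd]
  | [a, b, c, d, e] =>
      by_cases h1 : e = "env" <;> by_cases h2 : e = "genv" <;> by_cases h3 : e = "parent" <;>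
        simp [pvWalk, pvSlots, PySem.List.pyGet?, PySem.List.pyIdx?, h1, h2, h3]
  | a :: b :: c :: d :: e :: f :: rest =>
      have hlen : (a :: b :: c :: d :: e :: f :: rest).length = rest.length + 6 := by simp
      rw [hlen]
      have hw : pvWalk (a :: b :: c :: d :: e :: f :: rest) pvSlots = [] := by
        show pvWalk (a :: b :: c :: d :: e :: f :: rest)
          [none, some ["env"], none, some ["wrt"], some ["env", "genv", "parent"]] = []
        rw [pvWalk, pvWalk, pvWalk, pvWalk, pvWalk]
        cases rest <;> rw [pvWalk]
      rw [hw]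
      split_ifs <;> first | rfl | omega

-- ===== VERDICT (by name: the statement is the Claim_ definition above) =====
theorem complete_diff_export_py_spec : Claim_equal_complete_diff_export_py := by
  intro text line begidx endidx _
  show complete_diff_export_py text line begidx endidx = complete_diff_export_py_alt text line begidx endidx
  exact congrArg (List.filter fun f => decide (text = "") || PySem.Str.startswith f text)
    (pv_comps_eq (PySem.Str.split₀ line))
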